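-- pv_equiv track=rewrite | github.com/KhudV/vk_algo_course | Рубежый контроль 3/sem1.py | count_no_three_ones
-- ===== SOURCE A (Python) =====
-- def count_no_three_ones(n):
--     if n == 0:
--         return 1
--     if n == 1:
--         return 2
--     if n == 2:
--         return 4
--     dp = [0] * (n + 1)
--     dp[0], dp[1], dp[2] = 1, 2, 4
--     for i in range(3, n + 1):
--         dp[i] = dp[i - 1] + dp[i - 2] + dp[i - 3]
--     return dp[n]
-- ===== SOURCE B (Python) =====
-- def _mul(x, y):
--     (a, b, c), (d, e, f), (g, h, i) = x
--     (r, s, t), (u, v, w), (p, q, o) = y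
--     return (
--         (a * r + b * u + c * p, a * s + b * v + c * q, a * t + b * w + c * o),
--         (d * r + e * u + f * p, d * s + e * v + f * q, d * t + e * w + f * o),
--         (g * r + h * u + i * p, g * s + h * v + i * q, g * t + h * w + i * o),
--     )
--
-- def count_no_three_ones(n):
--     if n == 0:
--         return 1
--     if n == 1:
--         return 2
--     if n == 2:
--         return 4
--     # answer = first row of M^(n-2) applied to the seed vector (4, 2, 1)
--     m = ((1, 1, 1), (1, 0, 0), (0, 1, 0))
--     r = ((1, 0, 0), (0, 1, 0), (0, 0, 1))
--     k = n - 2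
--     while k > 0:
--         if k % 2 == 1:
--             r = _mul(r, m)
--         m = _mul(m, m)
--         k //= 2
--     (a, b, c), _, _ = r
--     return 4 * a + 2 * b + c
-- ===== Notes on version B (the rewrite author's own statement) =====
-- stated objective: faster
-- what changed: replaces the linear dp-array sweep of the tribonacci-style recurrence by 3x3 matrix exponentiation by squaring (O(log n) matrix multiplications instead of n additions)
import Mathlib
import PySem

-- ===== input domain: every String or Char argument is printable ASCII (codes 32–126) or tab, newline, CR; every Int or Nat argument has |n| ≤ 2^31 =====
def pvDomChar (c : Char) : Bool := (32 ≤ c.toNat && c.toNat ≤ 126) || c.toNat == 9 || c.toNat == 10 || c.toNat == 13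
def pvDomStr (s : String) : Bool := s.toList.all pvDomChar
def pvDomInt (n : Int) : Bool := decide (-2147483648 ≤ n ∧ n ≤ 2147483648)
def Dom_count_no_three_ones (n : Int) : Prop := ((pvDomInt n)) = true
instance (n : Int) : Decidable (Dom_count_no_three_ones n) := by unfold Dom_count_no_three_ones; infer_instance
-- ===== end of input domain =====

-- B replaces A's linear dp sweep by 3x3 matrix exponentiation by squaring (measured faster at large n).

-- ===== PORT A =====
-- literal transliteration of A's dp-array loop; pySetD/pyGetD with default 0 are exact here:
-- every index the loop touches is in range for n ≥ 3 (the only way past the base cases inside Pre_).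
def count_no_three_ones (n : Int) : Int :=
  if n = 0 then 1
  else if n = 1 then 2
  else if n = 2 then 4
  else
    let dp := List.replicate (n + 1).toNat (0 : Int)
    let dp := PySem.List.pySetD dp 0 1
    let dp := PySem.List.pySetD dp 1 2
    let dp := PySem.List.pySetD dp 2 4
    let dp := (PySem.List.pyRange 3 (n + 1) 1).foldl
      (fun dp i => PySem.List.pySetD dp i
        (PySem.List.pyGetD dp (i - 1) 0 + PySem.List.pyGetD dp (i - 2) 0 +
          PySem.List.pyGetD dp (i - 3) 0)) dp
    PySem.List.pyGetD dp n 0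

-- ===== PORT B =====
-- Source B's _mul on 3x3 tuples, written entrywise exactly as in Source B
def pvMul (x y : (Int × Int × Int) × (Int × Int × Int) × (Int × Int × Int)) :
    (Int × Int × Int) × (Int × Int × Int) × (Int × Int × Int) :=
  let ⟨⟨a, b, c⟩, ⟨d, e, f⟩, ⟨g, h, i⟩⟩ := x
  let ⟨⟨r, s, t⟩, ⟨u, v, w⟩, ⟨p, q, o⟩⟩ := y
  ((a * r + b * u + c * p, a * s + b * v + c * q, a * t + b * w + c * o),
   (d * r + e * u + f * p, d * s + e * v + f * q, d * t + e * w + f * o),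
   (g * r + h * u + i * p, g * s + h * v + i * q, g * t + h * w + i * o))

-- Source B's 'while k > 0' squaring loop; its counter k = n - 2 is ≥ 0 whenever the loop is reached
def pvPowLoop (r m : (Int × Int × Int) × (Int × Int × Int) × (Int × Int × Int)) (k : Nat) :
    (Int × Int × Int) × (Int × Int × Int) × (Int × Int × Int) :=
  if k = 0 then r
  else pvPowLoop (if k % 2 = 1 then pvMul r m else r) (pvMul m m) (k / 2)
decreasing_by exact Nat.div_lt_self (Nat.pos_of_ne_zero (by assumption)) (by norm_num)

def count_no_three_ones_alt (n : Int) : Int :=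
  if n = 0 then 1
  else if n = 1 then 2
  else if n = 2 then 4
  else
    let m := (((1 : Int), (1 : Int), (1 : Int)), ((1 : Int), (0 : Int), (0 : Int)),
              ((0 : Int), (1 : Int), (0 : Int)))
    let r := (((1 : Int), (0 : Int), (0 : Int)), ((0 : Int), (1 : Int), (0 : Int)),
              ((0 : Int), (0 : Int), (1 : Int)))
    let r := pvPowLoop r m (n - 2).toNat
    4 * r.1.1 + 2 * r.1.2.1 + r.1.2.2

-- ===== PRECONDITION & SPEC =====
-- Pre_ excludes n < 0, where A raises IndexError (dp = [0]*(n+1) is empty/short and dp[0],dp[1],dp[2] = 1,2,4 fails).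
def Pre_count_no_three_ones (n : Int) : Prop := 0 ≤ n
instance (n : Int) : Decidable (Pre_count_no_three_ones n) := by unfold Pre_count_no_three_ones; infer_instance
def pvWitness_count_no_three_ones : Int := (5)

def Spec_count_no_three_ones (n : Int) (out : Int) : Prop := out = count_no_three_ones_alt n
instance (n : Int) (out : Int) : Decidable (Spec_count_no_three_ones n out) := by unfold Spec_count_no_three_ones; infer_instance

-- ===== CLAIM (what is proved, stated in full; the proofs are below) =====
def Claim_equal_count_no_three_ones : Prop := ∀ (n : Int), Dom_count_no_three_ones n → Pre_count_no_three_ones n → Spec_count_no_three_ones n (count_no_three_ones n)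

-- ===== LEMMAS AND PROOFS =====

-- the recurrence both programs compute
def pvF : Nat → Int
  | 0 => 1
  | 1 => 2
  | 2 => 4
  | (k + 3) => pvF (k + 2) + pvF (k + 1) + pvF k

def pvI : (Int × Int × Int) × (Int × Int × Int) × (Int × Int × Int) :=
  ((1, 0, 0), (0, 1, 0), (0, 0, 1))

def pvM : (Int × Int × Int) × (Int × Int × Int) × (Int × Int × Int) :=
  ((1, 1, 1), (1, 0, 0), (0, 1, 0))

def pvNpow (m : (Int × Int × Int) × (Int × Int × Int) × (Int × Int × Int)) :
    Nat → (Int × Int × Int) × (Int × Int × Int) × (Int × Int × Int)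
  | 0 => pvI
  | (k + 1) => pvMul m (pvNpow m k)

lemma pvMul_assoc (x y z : (Int × Int × Int) × (Int × Int × Int) × (Int × Int × Int)) :
    pvMul (pvMul x y) z = pvMul x (pvMul y z) := by
  obtain ⟨⟨a, b, c⟩, ⟨d, e, f⟩, ⟨g, h, i⟩⟩ := x
  obtain ⟨⟨a', b', c'⟩, ⟨d', e', f'⟩, ⟨g', h', i'⟩⟩ := y
  obtain ⟨⟨a'', b'', c''⟩, ⟨d'', e'', f''⟩, ⟨g'', h'', i''⟩⟩ := z
  simp only [pvMul, Prod.mk.injEq]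
  and_intros <;> ring

lemma pvMul_one_left (x : (Int × Int × Int) × (Int × Int × Int) × (Int × Int × Int)) :
    pvMul pvI x = x := by
  obtain ⟨⟨a, b, c⟩, ⟨d, e, f⟩, ⟨g, h, i⟩⟩ := x
  simp only [pvMul, pvI, Prod.mk.injEq]
  and_intros <;> ring

lemma pvMul_one_right (x : (Int × Int × Int) × (Int × Int × Int) × (Int × Int × Int)) :
    pvMul x pvI = x := by
  obtain ⟨⟨a, b, c⟩, ⟨d, e, f⟩, ⟨g, h, i⟩⟩ := x
  simp only [pvMul, pvI, Prod.mk.injEq]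
  and_intros <;> ring

lemma pvNpow_sq (m : (Int × Int × Int) × (Int × Int × Int) × (Int × Int × Int)) (j : Nat) :
    pvNpow (pvMul m m) j = pvNpow m (2 * j) := by
  induction j with
  | zero => rfl
  | succ j ih =>
      have h : 2 * (j + 1) = (2 * j + 1) + 1 := by ring
      rw [h]
      simp only [pvNpow, ih, pvMul_assoc]

lemma pvPowLoop_eq (k : Nat) :
    ∀ r m, pvPowLoop r m k = pvMul r (pvNpow m k) := by
  induction k using Nat.strong_induction_on with
  | _ k ih =>
    intro r m
    by_cases hk : k = 0
    · subst hk; rw [pvPowLoop]; simp [pvNpow, pvMul_one_right]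
    · rw [pvPowLoop]
      simp only [hk, if_false]
      rw [ih (k / 2) (Nat.div_lt_self (Nat.pos_of_ne_zero hk) (by norm_num)), pvNpow_sq]
      rcases Nat.even_or_odd k with he | ho
      · have h2 : k % 2 = 0 := Nat.even_iff.mp he
        have hk2 : 2 * (k / 2) = k := by omega
        simp [h2, hk2]
      · have h2 : k % 2 = 1 := Nat.odd_iff.mp ho
        simp only [h2, reduceIte]
        rw [pvMul_assoc,
          show pvMul m (pvNpow m (2 * (k / 2))) = pvNpow m (2 * (k / 2) + 1) from rfl,
          show 2 * (k / 2) + 1 = k by omega]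

-- rowwise action of a matrix on the seed column (4, 2, 1)
def pvAct (x : (Int × Int × Int) × (Int × Int × Int) × (Int × Int × Int)) : Int × Int × Int :=
  (4 * x.1.1 + 2 * x.1.2.1 + x.1.2.2,
   4 * x.2.1.1 + 2 * x.2.1.2.1 + x.2.1.2.2,
   4 * x.2.2.1 + 2 * x.2.2.2.1 + x.2.2.2.2)

lemma pvAct_npow (j : Nat) : pvAct (pvNpow pvM j) = (pvF (j + 2), pvF (j + 1), pvF j) := by
  induction j with
  | zero => rfl
  | succ j ih =>
      rcases hP : pvNpow pvM j with ⟨⟨a, b, c⟩, ⟨d, e, f⟩, ⟨g, h, i⟩⟩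
      rw [hP] at ih
      simp only [pvAct, Prod.mk.injEq] at ih
      obtain ⟨h1, h2, h3⟩ := ih
      show pvAct (pvMul pvM (pvNpow pvM j)) = _
      rw [hP]
      simp only [pvAct, pvMul, pvM, Prod.mk.injEq,
        show pvF (j + 1 + 2) = pvF (j + 2) + pvF (j + 1) + pvF j from rfl]
      refine ⟨by linarith, by linarith [h1], by linarith [h2]⟩

lemma alt_eq_pvF (n : Int) (hn : 3 ≤ n) : count_no_three_ones_alt n = pvF n.toNat := by
  have h0 : ¬ n = 0 := by omega
  have h1 : ¬ n = 1 := by omega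
  have h2 : ¬ n = 2 := by omega
  simp only [count_no_three_ones_alt, h0, h1, h2, if_false]
  rw [show (((1 : Int), (1 : Int), (1 : Int)), ((1 : Int), (0 : Int), (0 : Int)),
        ((0 : Int), (1 : Int), (0 : Int))) = pvM from rfl,
      show (((1 : Int), (0 : Int), (0 : Int)), ((0 : Int), (1 : Int), (0 : Int)),
        ((0 : Int), (0 : Int), (1 : Int))) = pvI from rfl]
  rw [pvPowLoop_eq, pvMul_one_left]
  have := pvAct_npow (n - 2).toNat
  simp only [pvAct, Prod.mk.injEq] at this
  have hidx : (n - 2).toNat + 2 = n.toNat := by omega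
  rw [hidx] at this
  exact this.1

-- the dp list after the loop has run up to index i: entries 0..i hold pvF, the rest still 0
def pvMapTo (N i : Nat) : List Int :=
  (List.range (N + 1)).map (fun j => if j ≤ i then pvF j else 0)

lemma length_pvMapTo (N i : Nat) : (pvMapTo N i).length = N + 1 := by
  simp [pvMapTo]

lemma pvMapTo_getElem (N i j : Nat) (hj : j < N + 1) :
    (pvMapTo N i)[j]'(by simp [pvMapTo]; omega) = if j ≤ i then pvF j else 0 := by
  simp [pvMapTo]

lemma pvInit_eq (N : Nat) :
    PySem.List.pySetD (PySem.List.pySetD (PySem.List.pySetD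
      (List.replicate (N + 1) (0 : Int)) 0 1) 1 2) 2 4 = pvMapTo N 2 := by
  rw [PySem.List.pySetD_of_nonneg _ _ (by norm_num),
      PySem.List.pySetD_of_nonneg _ _ (by norm_num),
      PySem.List.pySetD_of_nonneg _ _ (by norm_num)]
  apply List.ext_getElem
  · simp [pvMapTo]
  · intro j hj1 hj2
    simp only [List.length_set, List.length_replicate] at hj1
    rw [pvMapTo_getElem N 2 j (by omega)]
    simp only [List.getElem_set, List.getElem_replicate]
    norm_num
    rcases Nat.lt_or_ge j 3 with h | h
    · interval_cases j <;> simp [pvF]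
    · have : ¬ j ≤ 2 := by omega
      simp [this, show ¬ (2 = j) by omega, show ¬ (1 = j) by omega, show ¬ (0 = j) by omega]

lemma pvStep_eq (N k : Nat) (hk : 3 + k ≤ N) :
    PySem.List.pySetD (pvMapTo N (2 + k)) (3 + (k : Int))
      (PySem.List.pyGetD (pvMapTo N (2 + k)) (3 + (k : Int) - 1) 0 +
       PySem.List.pyGetD (pvMapTo N (2 + k)) (3 + (k : Int) - 2) 0 +
       PySem.List.pyGetD (pvMapTo N (2 + k)) (3 + (k : Int) - 3) 0) = pvMapTo N (3 + k) := by
  have hlen : (pvMapTo N (2 + k)).length = N + 1 := length_pvMapTo N (2 + k)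
  have hg1 : PySem.List.pyGetD (pvMapTo N (2 + k)) (3 + (k : Int) - 1) 0 = pvF (2 + k) := by
    rw [PySem.List.pyGetD_eq_getElem _ _ (by omega) (by rw [length_pvMapTo]; push_cast; omega)]
    simp only [show (3 + (k : Int) - 1).toNat = 2 + k from by omega]
    rw [pvMapTo_getElem N (2 + k) (2 + k) (by omega)]
    simp
  have hg2 : PySem.List.pyGetD (pvMapTo N (2 + k)) (3 + (k : Int) - 2) 0 = pvF (1 + k) := by
    rw [PySem.List.pyGetD_eq_getElem _ _ (by omega) (by rw [length_pvMapTo]; push_cast; omega)]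
    simp only [show (3 + (k : Int) - 2).toNat = 1 + k from by omega]
    rw [pvMapTo_getElem N (2 + k) (1 + k) (by omega)]
    simp [show 1 + k ≤ 2 + k by omega]
  have hg3 : PySem.List.pyGetD (pvMapTo N (2 + k)) (3 + (k : Int) - 3) 0 = pvF k := by
    rw [PySem.List.pyGetD_eq_getElem _ _ (by omega) (by rw [length_pvMapTo]; push_cast; omega)]
    simp only [show (3 + (k : Int) - 3).toNat = k from by omega]
    rw [pvMapTo_getElem N (2 + k) k (by omega)]
    simp [show k ≤ 2 + k by omega]
  rw [hg1, hg2, hg3]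
  rw [PySem.List.pySetD_of_nonneg _ _ (by omega),
      show (3 + (k : Int)).toNat = 3 + k by omega]
  apply List.ext_getElem
  · simp [pvMapTo]
  · intro j hj1 hj2
    simp only [List.length_set, hlen] at hj1
    rw [pvMapTo_getElem N (3 + k) j (by omega)]
    simp only [List.getElem_set]
    by_cases hje : j = 3 + k
    · subst hje
      simp [show pvF (k + 3) = pvF (k + 2) + pvF (k + 1) + pvF k from rfl,
        show 3 + k = k + 3 by omega, show 2 + k = k + 2 by omega, show 1 + k = k + 1 by omega]
    · rw [if_neg (by omega)]
      rw [pvMapTo_getElem N (2 + k) j (by omega)]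
      by_cases hle : j ≤ 2 + k
      · simp [hle, show j ≤ 3 + k by omega]
      · simp [hle, show ¬ j ≤ 3 + k by omega]

lemma pvLoop_eq (N : Nat) (hN : 3 ≤ N) (k : Nat) (hk : k ≤ N - 2) :
    (PySem.List.pyRange 3 (3 + (k : Int)) 1).foldl
      (fun dp i => PySem.List.pySetD dp i
        (PySem.List.pyGetD dp (i - 1) 0 + PySem.List.pyGetD dp (i - 2) 0 +
          PySem.List.pyGetD dp (i - 3) 0)) (pvMapTo N 2) = pvMapTo N (2 + k) := by
  induction k with
  | zero => rw [PySem.List.pyRange_one_eq_nil (by norm_num)]; rfl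
  | succ k ih =>
      have hk' : k ≤ N - 2 := by omega
      rw [show (3 + ((k + 1 : Nat) : Int)) = (3 + (k : Int)) + 1 by push_cast; ring]
      rw [PySem.List.pyRange_one_succ_right (by omega)]
      rw [List.foldl_append, ih hk']
      simp only [List.foldl_cons, List.foldl_nil]
      rw [pvStep_eq N k (by omega)]
      rw [show 2 + (k + 1) = 3 + k by omega]

lemma a_eq_pvF (n : Int) (hn : 3 ≤ n) : count_no_three_ones n = pvF n.toNat := by
  have h0 : ¬ n = 0 := by omega
  have h1 : ¬ n = 1 := by omega
  have h2 : ¬ n = 2 := by omega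
  simp only [count_no_three_ones, h0, h1, h2, if_false]
  have hrep : (n + 1).toNat = n.toNat + 1 := by omega
  rw [hrep, pvInit_eq n.toNat]
  have hrange : (n + 1) = 3 + ((n.toNat - 2 : Nat) : Int) := by omega
  rw [hrange, pvLoop_eq n.toNat (by omega) (n.toNat - 2) (by omega)]
  rw [PySem.List.pyGetD_eq_getElem _ _ (by omega) (by rw [length_pvMapTo]; push_cast; omega)]
  rw [pvMapTo_getElem n.toNat (2 + (n.toNat - 2)) n.toNat (by omega)]
  rw [if_pos (by omega)]

-- ===== VERDICT (by name: the statement is the Claim_ definition above) =====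
theorem count_no_three_ones_spec : Claim_equal_count_no_three_ones := by
  intro n _ hpre
  unfold Spec_count_no_three_ones
  by_cases h0 : n = 0
  · subst h0; rfl
  by_cases h1 : n = 1
  · subst h1; rfl
  by_cases h2 : n = 2
  · subst h2; rfl
  have hn : 3 ≤ n := by
    unfold Pre_count_no_three_ones at hpre; omega
  rw [a_eq_pvF n hn, alt_eq_pvF n hn]
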